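-- pv_equiv track=rewrite | github.com/varunnnb/balco | app/main.py | get_redirect_action
-- ===== SOURCE A (Python) =====
-- def get_redirect_action(q_lower, metas):
--     # Appointment intent
--     if "appointment" in q_lower or "book" in q_lower:
--         return {
--             "type": "redirect",
--             "url": "https://www.balcomedicalcentre.com/appointment"
--         }
--
--     # Doctor page intent
--     if any(m.get("type") == "doctor" for m in metas):
--         return {
--             "type": "redirect",
--             "url": "https://www.balcomedicalcentre.com/doctors"
--         }
--
--     # Department page intent
--     if any(m.get("type") == "department" for m in metas):
--         return {
--             "type": "redirect",
--             "url": "https://www.balcomedicalcentre.com/specialities"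
--         }
--
--     return None
-- ===== SOURCE B (Python) =====
-- _PRIORITY = {"doctor": 0, "department": 1}
-- _URLS = ["https://www.balcomedicalcentre.com/doctors",
--          "https://www.balcomedicalcentre.com/specialities"]
--
-- def get_redirect_action(q_lower, metas):
--     if "appointment" in q_lower or "book" in q_lower:
--         return {"type": "redirect",
--                 "url": "https://www.balcomedicalcentre.com/appointment"}
--     # single pass: track the best (smallest) priority seen, break at top priority
--     best = 2
--     for m in metas:
--         p = _PRIORITY.get(m.get("type"), 2)
--         if p < best:
--             best = p
--             if best == 0:
--                 break
--     if best < 2: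
--         return {"type": "redirect", "url": _URLS[best]}
--     return None
-- ===== Notes on version B (the rewrite author's own statement) =====
-- stated objective: alternative
-- what changed: Replaces A's two staged any() scans over metas with a single pass maintaining a minimum-priority accumulator (with early break at top priority) and a priority-indexed URL table.
import Mathlib
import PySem

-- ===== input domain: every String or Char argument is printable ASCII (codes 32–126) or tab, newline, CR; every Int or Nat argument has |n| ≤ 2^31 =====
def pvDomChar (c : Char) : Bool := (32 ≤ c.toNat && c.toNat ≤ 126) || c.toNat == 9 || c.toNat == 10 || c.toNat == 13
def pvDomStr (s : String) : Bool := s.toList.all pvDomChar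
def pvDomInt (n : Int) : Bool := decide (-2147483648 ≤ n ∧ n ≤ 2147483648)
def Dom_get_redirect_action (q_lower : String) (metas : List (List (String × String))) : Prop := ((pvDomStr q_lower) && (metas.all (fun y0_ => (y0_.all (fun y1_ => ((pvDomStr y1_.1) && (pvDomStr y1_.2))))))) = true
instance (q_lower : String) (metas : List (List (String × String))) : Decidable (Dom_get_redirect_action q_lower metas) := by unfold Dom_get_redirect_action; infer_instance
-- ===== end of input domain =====

-- B replaces A's two staged any() scans with one pass keeping a minimum-priority accumulator (early break at priority 0) and a priority-indexed URL table (objective: alternative).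

-- ===== PORT A =====
def get_redirect_action (q_lower : String) (metas : List (List (String × String))) : Option (List (String × String)) :=
  if PySem.Str.isIn "appointment" q_lower || PySem.Str.isIn "book" q_lower then
    some [("type", "redirect"), ("url", "https://www.balcomedicalcentre.com/appointment")]
  else if metas.any (fun m => PySem.Dict.get? (PySem.Dict.mk m) "type" == some "doctor") then
    some [("type", "redirect"), ("url", "https://www.balcomedicalcentre.com/doctors")]
  else if metas.any (fun m => PySem.Dict.get? (PySem.Dict.mk m) "type" == some "department") then
    some [("type", "redirect"), ("url", "https://www.balcomedicalcentre.com/specialities")]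
  else
    none

-- ===== PORT B =====
-- _PRIORITY.get(m.get("type"), 2): the dict's keys are the two strings, a None key misses (exact hand port of the lookup)
def pvPrioB (t : Option String) : Nat :=
  PySem.Dict.getD (PySem.Dict.mk [(some "doctor", 0), (some "department", 1)]) t 2

def pvUrlsB : List String :=
  ["https://www.balcomedicalcentre.com/doctors", "https://www.balcomedicalcentre.com/specialities"]

-- the for-loop with its early break: best is the running minimum priority
def pvLoopB : List (List (String × String)) → Nat → Nat
  | [], best => best
  | m :: rest, best =>
      let p := pvPrioB (PySem.Dict.get? (PySem.Dict.mk m) "type")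
      if p < best then (if p = 0 then 0 else pvLoopB rest p) else pvLoopB rest best

def get_redirect_action_alt (q_lower : String) (metas : List (List (String × String))) : Option (List (String × String)) :=
  if PySem.Str.isIn "appointment" q_lower || PySem.Str.isIn "book" q_lower then
    some [("type", "redirect"), ("url", "https://www.balcomedicalcentre.com/appointment")]
  else
    let best := pvLoopB metas 2
    if best < 2 then some [("type", "redirect"), ("url", pvUrlsB.getD best "")] else none

-- ===== PRECONDITION & SPEC =====
def Spec_get_redirect_action (q_lower : String) (metas : List (List (String × String))) (out : Option (List (String × String))) : Prop := out = get_redirect_action_alt q_lower metas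
instance (q_lower : String) (metas : List (List (String × String))) (out : Option (List (String × String))) : Decidable (Spec_get_redirect_action q_lower metas out) := by unfold Spec_get_redirect_action; infer_instance

-- ===== CLAIM =====
def Claim_equal_get_redirect_action : Prop := ∀ (q_lower : String) (metas : List (List (String × String))), Dom_get_redirect_action q_lower metas → Spec_get_redirect_action q_lower metas (get_redirect_action q_lower metas)

-- ===== LEMMAS AND PROOFS =====

-- a priority is always at most 2
theorem pvPrioB_eq_two (s : String) (h1 : s ≠ "doctor") (h2 : s ≠ "department") :
    pvPrioB (some s) = 2 := by
  have e1 : ("doctor" == s) = false := by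
    simp only [beq_eq_false_iff_ne]; exact fun h => h1 h.symm
  have e2 : ("department" == s) = false := by
    simp only [beq_eq_false_iff_ne]; exact fun h => h2 h.symm
  simp [pvPrioB, PySem.Dict.getD, PySem.Dict.get?, List.find?, e1, e2]

theorem pvPrioB_le (t : Option String) : pvPrioB t ≤ 2 := by
  rcases t with _ | s
  · exact le_refl 2
  · by_cases h1 : s = "doctor"
    · subst h1; decide
    · by_cases h2 : s = "department"
      · subst h2; decide
      · rw [pvPrioB_eq_two s h1 h2]

-- the loop computes the minimum of its accumulator and the best priority present in metas
theorem pvLoopB_eq (metas : List (List (String × String))) (best : Nat) (hb : best ≤ 2) :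
    pvLoopB metas best =
      min best
        (if metas.any (fun m => PySem.Dict.get? (PySem.Dict.mk m) "type" == some "doctor") then 0
         else if metas.any (fun m => PySem.Dict.get? (PySem.Dict.mk m) "type" == some "department") then 1
         else 2) := by
  induction metas generalizing best with
  | nil => simp [pvLoopB]; omega
  | cons m rest ih =>
      simp only [pvLoopB, List.any_cons]
      rw [ih (pvPrioB (PySem.Dict.get? (PySem.Dict.mk m) "type")) (pvPrioB_le _), ih best hb]
      by_cases hd : PySem.Dict.get? (PySem.Dict.mk m) "type" = some "doctor"
      · simp only [hd, show pvPrioB (some "doctor") = 0 from rfl, beq_self_eq_true, Bool.true_or]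
        split_ifs <;> omega
      · by_cases hp : PySem.Dict.get? (PySem.Dict.mk m) "type" = some "department"
        · simp only [hp, show pvPrioB (some "department") = 1 from rfl,
                     show ((some "department" : Option String) == some "doctor") = false from by decide,
                     beq_self_eq_true, Bool.false_or, Bool.true_or]
          split_ifs <;> simp_all <;> omega
        · have hpr : pvPrioB (PySem.Dict.get? (PySem.Dict.mk m) "type") = 2 := by
            rcases ht : PySem.Dict.get? (PySem.Dict.mk m) "type" with _ | s
            · rfl
            · rw [ht] at hd hp
              simp only [Option.some.injEq] at hd hp
              exact pvPrioB_eq_two s hd hp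
          simp only [hpr,
            show (PySem.Dict.get? (PySem.Dict.mk m) "type" == some "doctor") = false from by
              simp [hd],
            show (PySem.Dict.get? (PySem.Dict.mk m) "type" == some "department") = false from by
              simp [hp],
            Bool.false_or]
          split_ifs <;> omega

-- ===== VERDICT =====
theorem get_redirect_action_spec : Claim_equal_get_redirect_action := by
  intro q metas _
  unfold Spec_get_redirect_action get_redirect_action get_redirect_action_alt
  rw [pvLoopB_eq metas 2 (by omega)]
  by_cases hq : (PySem.Str.isIn "appointment" q || PySem.Str.isIn "book" q) = true
  · rw [if_pos hq, if_pos hq]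
  · rw [if_neg hq, if_neg hq]
    by_cases hd : (metas.any fun m => PySem.Dict.get? (PySem.Dict.mk m) "type" == some "doctor") = true
    · simp [hd, pvUrlsB]
    · by_cases hp : (metas.any fun m => PySem.Dict.get? (PySem.Dict.mk m) "type" == some "department") = true
      · simp [hd, hp, pvUrlsB]
      · simp [hd, hp]
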